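-- pv_equiv track=rewrite | github.com/ArcaneNibble/openfpga | testcsp2.py | reformat_graph_nodes
-- ===== SOURCE A (Python) =====
-- def reformat_graph_nodes(e, num_nodes):
--     nodes = [None] * num_nodes
--     for i in range(num_nodes):
--         nodes[i] = ([], [])
--
--     for i, e_ in enumerate(e):
--         nodes[e_[0]][1].append(i)
--         nodes[e_[2]][0].append(i)
--
--     return nodes
-- ===== SOURCE B (Python) =====
-- def _group_by_node(e, num_nodes, key):
--     # bucket edge indices by the node id selected from each edge
--     buckets = [[] for _ in range(num_nodes)]
--     for i, e_ in enumerate(e):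
--         buckets[key(e_)].append(i)
--     return buckets
--
-- def reformat_graph_nodes(e, num_nodes):
--     incoming = _group_by_node(e, num_nodes, lambda e_: e_[2])
--     outgoing = _group_by_node(e, num_nodes, lambda e_: e_[0])
--     return list(zip(incoming, outgoing))
-- ===== Notes on version B (the rewrite author's own statement) =====
-- stated objective: alternative
-- what changed: B buckets edge indices per direction in two passes with a shared grouping helper (one table of plain lists per direction) and zips the two tables into the result, instead of A's single pass mutating one preallocated table of (incoming, outgoing) pairs.
import Mathlib
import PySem

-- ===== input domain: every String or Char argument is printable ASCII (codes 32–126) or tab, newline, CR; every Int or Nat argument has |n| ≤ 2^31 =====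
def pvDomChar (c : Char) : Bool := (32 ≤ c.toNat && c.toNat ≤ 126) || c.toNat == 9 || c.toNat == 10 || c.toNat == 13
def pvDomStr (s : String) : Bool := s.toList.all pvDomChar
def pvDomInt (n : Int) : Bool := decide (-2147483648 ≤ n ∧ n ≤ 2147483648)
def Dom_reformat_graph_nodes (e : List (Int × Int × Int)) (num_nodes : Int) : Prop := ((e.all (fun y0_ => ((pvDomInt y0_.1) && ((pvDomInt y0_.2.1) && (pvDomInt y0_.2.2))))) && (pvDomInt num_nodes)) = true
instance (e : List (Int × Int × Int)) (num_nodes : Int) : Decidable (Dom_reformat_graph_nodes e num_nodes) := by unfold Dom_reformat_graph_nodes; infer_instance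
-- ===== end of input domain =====

-- B buckets edge indices per direction (two passes with a shared grouping helper, one table of
-- plain lists per direction) and zips the two tables, instead of A's single pass mutating one
-- table of (incoming, outgoing) pairs (objective: alternative, not faster).

-- ===== PORT A =====
-- one iteration of A's edge loop: nodes[e_[0]][1].append(i); nodes[e_[2]][0].append(i)
-- (Python's tuple-in-list mutation is rendered as read-modify-write with Python index semantics)
def pvStepA (nodes : List (List Int × List Int)) (ie : Int × Int × Int × Int) :
    List (List Int × List Int) :=
  let i := ie.1
  let e_ := ie.2
  let c0 := PySem.List.pyGetD nodes e_.1 ([], [])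
  let nodes1 := PySem.List.pySetD nodes e_.1 (c0.1, c0.2 ++ [i])
  let c1 := PySem.List.pyGetD nodes1 e_.2.2 ([], [])
  PySem.List.pySetD nodes1 e_.2.2 (c1.1 ++ [i], c1.2)

def reformat_graph_nodes (e : List (Int × Int × Int)) (num_nodes : Int) : List (List Int × List Int) :=
  -- [None]*num_nodes followed by the fill loop: a table of num_nodes fresh ([], []) pairs
  let nodes := List.replicate num_nodes.toNat (([], []) : List Int × List Int)
  (PySem.List.enumerate e 0).foldl pvStepA nodes

-- ===== PORT B =====
-- _group_by_node: buckets[key(e_)].append(i), rendered as read-modify-write like A's loop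
def pvGroupByNode (e : List (Int × Int × Int)) (num_nodes : Int)
    (key : Int × Int × Int → Int) : List (List Int) :=
  (PySem.List.enumerate e 0).foldl
    (fun buckets ie =>
      PySem.List.pySetD buckets (key ie.2) (PySem.List.pyGetD buckets (key ie.2) [] ++ [ie.1]))
    (List.replicate num_nodes.toNat ([] : List Int))

def reformat_graph_nodes_alt (e : List (Int × Int × Int)) (num_nodes : Int) : List (List Int × List Int) :=
  let incoming := pvGroupByNode e num_nodes (fun e_ => e_.2.2)
  let outgoing := pvGroupByNode e num_nodes (fun e_ => e_.1)
  List.zip incoming outgoing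

-- ===== PRECONDITION & SPEC =====
-- Pre_ excludes exactly the inputs where A raises IndexError: an edge endpoint outside
-- [-num_nodes, num_nodes) (in particular any edge at all when num_nodes ≤ 0).
def Pre_reformat_graph_nodes (e : List (Int × Int × Int)) (num_nodes : Int) : Prop :=
  ∀ p ∈ e, -num_nodes ≤ p.1 ∧ p.1 < num_nodes ∧ -num_nodes ≤ p.2.2 ∧ p.2.2 < num_nodes
instance (e : List (Int × Int × Int)) (num_nodes : Int) : Decidable (Pre_reformat_graph_nodes e num_nodes) := by
  unfold Pre_reformat_graph_nodes; infer_instance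
def pvWitness_reformat_graph_nodes : (List (Int × Int × Int)) × Int := ([(0, 5, 1), (1, 0, 0)], 2)

def Spec_reformat_graph_nodes (e : List (Int × Int × Int)) (num_nodes : Int) (out : List (List Int × List Int)) : Prop :=
  out = reformat_graph_nodes_alt e num_nodes
instance (e : List (Int × Int × Int)) (num_nodes : Int) (out : List (List Int × List Int)) : Decidable (Spec_reformat_graph_nodes e num_nodes out) := by
  unfold Spec_reformat_graph_nodes; infer_instance

-- ===== CLAIM (what is proved, stated in full; the proofs are below) =====
def Claim_equal_reformat_graph_nodes : Prop := ∀ (e : List (Int × Int × Int)) (num_nodes : Int), Dom_reformat_graph_nodes e num_nodes → Pre_reformat_graph_nodes e num_nodes → Spec_reformat_graph_nodes e num_nodes (reformat_graph_nodes e num_nodes)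

-- ===== LEMMAS AND PROOFS =====

-- the index Python actually uses for xs[i] (negative i counts from the end)
def pvRes (len : Nat) (i : Int) : Nat := if i < 0 then len - (-i).toNat else i.toNat

theorem pvRes_lt (len : Nat) (i : Int) (h1 : -(len : Int) ≤ i) (h2 : i < len) :
    pvRes len i < len := by
  unfold pvRes; split_ifs <;> omega

theorem pvIdx?_inrange (n : Nat) (i : Int) (h1 : -(n : Int) ≤ i) (h2 : i < n) :
    PySem.List.pyIdx? n i = some (pvRes n i) := by
  simp [PySem.List.pyIdx?, pvRes]
  split_ifs <;> simp_all <;> omega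

theorem pvGetD_res {α : Type} (xs : List α) (i : Int) (d : α)
    (h1 : -(xs.length : Int) ≤ i) (h2 : i < xs.length) :
    PySem.List.pyGetD xs i d = xs[pvRes xs.length i]'(pvRes_lt _ _ h1 h2) := by
  simp [PySem.List.pyGetD, PySem.List.pyGet?, pvIdx?_inrange _ _ h1 h2,
    List.getElem?_eq_getElem (pvRes_lt _ _ h1 h2)]

theorem pvSetD_res {α : Type} (xs : List α) (i : Int) (v : α)
    (h1 : -(xs.length : Int) ≤ i) (h2 : i < xs.length) :
    PySem.List.pySetD xs i v = xs.set (pvRes xs.length i) v := by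
  simp [PySem.List.pySetD, PySem.List.pySet?, pvIdx?_inrange _ _ h1 h2]

theorem pvStepA_length (nodes : List (List Int × List Int)) (ie : Int × Int × Int × Int)
    (ha1 : -(nodes.length : Int) ≤ ie.2.1) (ha2 : ie.2.1 < nodes.length)
    (hc1 : -(nodes.length : Int) ≤ ie.2.2.2) (hc2 : ie.2.2.2 < nodes.length) :
    (pvStepA nodes ie).length = nodes.length := by
  simp only [pvStepA]
  rw [pvSetD_res _ _ _ ha1 ha2]
  rw [pvSetD_res _ _ _ (by simpa using hc1) (by simpa using hc2)]
  simp

theorem pvStepA_getElem (nodes : List (List Int × List Int)) (ie : Int × Int × Int × Int)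
    (ha1 : -(nodes.length : Int) ≤ ie.2.1) (ha2 : ie.2.1 < nodes.length)
    (hc1 : -(nodes.length : Int) ≤ ie.2.2.2) (hc2 : ie.2.2.2 < nodes.length)
    (k : Nat) (hk : k < nodes.length) :
    (pvStepA nodes ie)[k]? =
      some (nodes[k].1 ++ (if pvRes nodes.length ie.2.2.2 = k then [ie.1] else []),
            nodes[k].2 ++ (if pvRes nodes.length ie.2.1 = k then [ie.1] else [])) := by
  have hra := pvRes_lt nodes.length ie.2.1 ha1 ha2
  have hrc := pvRes_lt nodes.length ie.2.2.2 hc1 hc2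
  simp only [pvStepA]
  rw [pvGetD_res _ _ _ ha1 ha2, pvSetD_res _ _ _ ha1 ha2]
  rw [pvGetD_res _ _ _ (by simpa using hc1) (by simpa using hc2),
      pvSetD_res _ _ _ (by simpa using hc1) (by simpa using hc2)]
  simp only [List.length_set]
  rw [List.getElem?_set]
  by_cases hc : pvRes nodes.length ie.2.2.2 = k <;>
    by_cases hA : pvRes nodes.length ie.2.1 = k <;>
      simp [hc, hA, List.getElem_set, List.getElem?_set, List.getElem?_eq_getElem, hk]

theorem pvFoldA (es : List (Int × Int × Int)) (s : Int) (nodes : List (List Int × List Int))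
    (hall : ∀ p ∈ es, -(nodes.length : Int) ≤ p.1 ∧ p.1 < nodes.length ∧
                      -(nodes.length : Int) ≤ p.2.2 ∧ p.2.2 < nodes.length)
    (k : Nat) (hk : k < nodes.length) :
    ((PySem.List.enumerate es s).foldl pvStepA nodes)[k]? =
      some (nodes[k].1 ++ ((PySem.List.enumerate es s).filter
              (fun p => pvRes nodes.length p.2.2.2 == k)).map (fun p => p.1),
            nodes[k].2 ++ ((PySem.List.enumerate es s).filter
              (fun p => pvRes nodes.length p.2.1 == k)).map (fun p => p.1)) := by
  induction es generalizing s nodes with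
  | nil => simp [PySem.List.enumerate_nil, List.getElem?_eq_getElem hk]
  | cons hd tl ih =>
    obtain ⟨ha1, ha2, hc1, hc2⟩ := hall hd (List.mem_cons_self ..)
    have hlen := pvStepA_length nodes (s, hd) ha1 ha2 hc1 hc2
    rw [PySem.List.enumerate_cons, List.foldl_cons]
    have hall' : ∀ p ∈ tl, -((pvStepA nodes (s, hd)).length : Int) ≤ p.1 ∧
        p.1 < (pvStepA nodes (s, hd)).length ∧
        -((pvStepA nodes (s, hd)).length : Int) ≤ p.2.2 ∧
        p.2.2 < (pvStepA nodes (s, hd)).length := by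
      rw [hlen]; exact fun p hp => hall p (List.mem_cons_of_mem _ hp)
    rw [ih _ _ hall' (hlen ▸ hk)]
    have hstep := pvStepA_getElem nodes (s, hd) ha1 ha2 hc1 hc2 k hk
    have hget : (pvStepA nodes (s, hd))[k]'(hlen ▸ hk) =
        (nodes[k].1 ++ (if pvRes nodes.length hd.2.2 = k then [s] else []),
         nodes[k].2 ++ (if pvRes nodes.length hd.1 = k then [s] else [])) := by
      have := (List.getElem?_eq_getElem (l := pvStepA nodes (s, hd)) (hlen ▸ hk)).symm.trans hstep
      exact Option.some.inj this
    rw [hget, hlen]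
    rw [List.filter_cons, List.filter_cons]
    by_cases hc : pvRes nodes.length hd.2.2 = k <;>
      by_cases hA : pvRes nodes.length hd.1 = k <;>
        simp [hc, hA, List.append_assoc]

theorem pvFold_length (es : List (Int × Int × Int)) (s : Int)
    (nodes : List (List Int × List Int))
    (hall : ∀ p ∈ es, -(nodes.length : Int) ≤ p.1 ∧ p.1 < nodes.length ∧
                      -(nodes.length : Int) ≤ p.2.2 ∧ p.2.2 < nodes.length) :
    ((PySem.List.enumerate es s).foldl pvStepA nodes).length = nodes.length := by
  induction es generalizing s nodes with
  | nil => simp [PySem.List.enumerate_nil]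
  | cons hd tl ih =>
    obtain ⟨ha1, ha2, hc1, hc2⟩ := hall hd (List.mem_cons_self ..)
    have hlen := pvStepA_length nodes (s, hd) ha1 ha2 hc1 hc2
    rw [PySem.List.enumerate_cons, List.foldl_cons]
    rw [ih _ _ (by rw [hlen]; exact fun p hp => hall p (List.mem_cons_of_mem _ hp))]
    exact hlen

theorem pvA_get (e : List (Int × Int × Int)) (n : Int)
    (hpre : Pre_reformat_graph_nodes e n) (hn : 0 ≤ n) (k : Nat) (hk : k < n.toNat) :
    (reformat_graph_nodes e n)[k]? = some
      (((PySem.List.enumerate e 0).filter (fun p => pvRes n.toNat p.2.2.2 == k)).map (fun p => p.1),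
       ((PySem.List.enumerate e 0).filter (fun p => pvRes n.toNat p.2.1 == k)).map (fun p => p.1)) := by
  have hcast : ((n.toNat : Int)) = n := Int.toNat_of_nonneg hn
  have hall : ∀ p ∈ e,
      -(((List.replicate n.toNat (([], []) : List Int × List Int)).length : Int)) ≤ p.1 ∧
      p.1 < (List.replicate n.toNat (([], []) : List Int × List Int)).length ∧
      -(((List.replicate n.toNat (([], []) : List Int × List Int)).length : Int)) ≤ p.2.2 ∧
      p.2.2 < (List.replicate n.toNat (([], []) : List Int × List Int)).length := by
    simp only [List.length_replicate, hcast]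
    exact hpre
  have h := pvFoldA e 0 (List.replicate n.toNat (([], []) : List Int × List Int)) hall k
    (by simpa using hk)
  simp only [List.length_replicate, List.getElem_replicate, List.nil_append] at h
  simpa [reformat_graph_nodes] using h

theorem pvA_length (e : List (Int × Int × Int)) (n : Int)
    (hpre : Pre_reformat_graph_nodes e n) (hn : 0 ≤ n) :
    (reformat_graph_nodes e n).length = n.toNat := by
  have hall : ∀ p ∈ e,
      -(((List.replicate n.toNat (([], []) : List Int × List Int)).length : Int)) ≤ p.1 ∧
      p.1 < (List.replicate n.toNat (([], []) : List Int × List Int)).length ∧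
      -(((List.replicate n.toNat (([], []) : List Int × List Int)).length : Int)) ≤ p.2.2 ∧
      p.2.2 < (List.replicate n.toNat (([], []) : List Int × List Int)).length := by
    simp only [List.length_replicate, Int.toNat_of_nonneg hn]
    exact hpre
  simpa [reformat_graph_nodes] using
    pvFold_length e 0 (List.replicate n.toNat (([], []) : List Int × List Int)) hall

-- the same invariant for B's one-direction grouping fold
theorem pvGroupFold (key : Int × Int × Int → Int) (es : List (Int × Int × Int)) (s : Int)
    (l : List (List Int))
    (hall : ∀ p ∈ es, -(l.length : Int) ≤ key p ∧ key p < l.length)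
    (k : Nat) (hk : k < l.length) :
    (((PySem.List.enumerate es s).foldl
        (fun buckets ie =>
          PySem.List.pySetD buckets (key ie.2) (PySem.List.pyGetD buckets (key ie.2) [] ++ [ie.1]))
        l)[k]?) =
      some (l[k] ++ ((PySem.List.enumerate es s).filter
              (fun p => pvRes l.length (key p.2) == k)).map (fun p => p.1)) := by
  induction es generalizing s l with
  | nil => simp [PySem.List.enumerate_nil, List.getElem?_eq_getElem hk]
  | cons hd tl ih =>
    obtain ⟨h1, h2⟩ := hall hd (List.mem_cons_self ..)
    have hr := pvRes_lt l.length (key hd) h1 h2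
    rw [PySem.List.enumerate_cons, List.foldl_cons]
    have hset : PySem.List.pySetD l (key hd) (PySem.List.pyGetD l (key hd) [] ++ [s]) =
        l.set (pvRes l.length (key hd)) (l[pvRes l.length (key hd)] ++ [s]) := by
      rw [pvGetD_res _ _ _ h1 h2, pvSetD_res _ _ _ h1 h2]
    rw [hset]
    have hlen : (l.set (pvRes l.length (key hd)) (l[pvRes l.length (key hd)] ++ [s])).length
        = l.length := by simp
    have hall' : ∀ p ∈ tl,
        -(((l.set (pvRes l.length (key hd)) (l[pvRes l.length (key hd)] ++ [s])).length : Int))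
          ≤ key p ∧
        key p < (l.set (pvRes l.length (key hd)) (l[pvRes l.length (key hd)] ++ [s])).length := by
      rw [hlen]; exact fun p hp => hall p (List.mem_cons_of_mem _ hp)
    rw [ih _ _ hall' (by rw [hlen]; exact hk)]
    rw [List.filter_cons]
    by_cases hc : pvRes l.length (key hd) = k <;>
      simp [hc, hlen, List.getElem_set, List.append_assoc]

theorem pvGroup_length (key : Int × Int × Int → Int) (es : List (Int × Int × Int)) (s : Int)
    (l : List (List Int))
    (hall : ∀ p ∈ es, -(l.length : Int) ≤ key p ∧ key p < l.length) :
    ((PySem.List.enumerate es s).foldl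
        (fun buckets ie =>
          PySem.List.pySetD buckets (key ie.2) (PySem.List.pyGetD buckets (key ie.2) [] ++ [ie.1]))
        l).length = l.length := by
  induction es generalizing s l with
  | nil => simp [PySem.List.enumerate_nil]
  | cons hd tl ih =>
    obtain ⟨h1, h2⟩ := hall hd (List.mem_cons_self ..)
    rw [PySem.List.enumerate_cons, List.foldl_cons]
    rw [pvGetD_res _ _ _ h1 h2, pvSetD_res _ _ _ h1 h2]
    rw [ih _ _ (by simp only [List.length_set]; exact fun p hp => hall p (List.mem_cons_of_mem _ hp))]
    simp

theorem pvGroup_get (e : List (Int × Int × Int)) (n : Int) (key : Int × Int × Int → Int)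
    (hsel : ∀ p ∈ e, -n ≤ key p ∧ key p < n) (hn : 0 ≤ n) (k : Nat) (hk : k < n.toNat) :
    (pvGroupByNode e n key)[k]? =
      some (((PySem.List.enumerate e 0).filter
              (fun p => pvRes n.toNat (key p.2) == k)).map (fun p => p.1)) := by
  have hcast : ((n.toNat : Int)) = n := Int.toNat_of_nonneg hn
  have hall : ∀ p ∈ e,
      -(((List.replicate n.toNat ([] : List Int)).length : Int)) ≤ key p ∧
      key p < (List.replicate n.toNat ([] : List Int)).length := by
    simp only [List.length_replicate, hcast]; exact hsel
  have h := pvGroupFold key e 0 (List.replicate n.toNat ([] : List Int)) hall k (by simpa using hk)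
  simp only [List.length_replicate, List.getElem_replicate, List.nil_append] at h
  simpa [pvGroupByNode] using h

theorem pvGroup_len (e : List (Int × Int × Int)) (n : Int) (key : Int × Int × Int → Int)
    (hsel : ∀ p ∈ e, -n ≤ key p ∧ key p < n) (hn : 0 ≤ n) :
    (pvGroupByNode e n key).length = n.toNat := by
  have hall : ∀ p ∈ e,
      -(((List.replicate n.toNat ([] : List Int)).length : Int)) ≤ key p ∧
      key p < (List.replicate n.toNat ([] : List Int)).length := by
    simp only [List.length_replicate, Int.toNat_of_nonneg hn]; exact hsel
  simpa [pvGroupByNode] using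
    pvGroup_length key e 0 (List.replicate n.toNat ([] : List Int)) hall

theorem pvAeqB (e : List (Int × Int × Int)) (n : Int)
    (hpre : Pre_reformat_graph_nodes e n) :
    reformat_graph_nodes e n = reformat_graph_nodes_alt e n := by
  by_cases hn : 0 ≤ n
  ·
    have hselIn : ∀ p ∈ e, -n ≤ (fun e_ : Int × Int × Int => e_.2.2) p ∧
        (fun e_ : Int × Int × Int => e_.2.2) p < n :=
      fun p hp => ⟨(hpre p hp).2.2.1, (hpre p hp).2.2.2⟩
    have hselOut : ∀ p ∈ e, -n ≤ (fun e_ : Int × Int × Int => e_.1) p ∧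
        (fun e_ : Int × Int × Int => e_.1) p < n :=
      fun p hp => ⟨(hpre p hp).1, (hpre p hp).2.1⟩
    have hlenA := pvA_length e n hpre hn
    have hlenIn := pvGroup_len e n _ hselIn hn
    have hlenOut := pvGroup_len e n _ hselOut hn
    have hlenB : (reformat_graph_nodes_alt e n).length = n.toNat := by
      simp [reformat_graph_nodes_alt, List.length_zip, hlenIn, hlenOut]
    apply List.ext_getElem?
    intro k
    by_cases hk : k < n.toNat
    · have hki : k < (pvGroupByNode e n (fun e_ => e_.2.2)).length := by omega
      have hko : k < (pvGroupByNode e n (fun e_ => e_.1)).length := by omega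
      have hkz : k < (reformat_graph_nodes_alt e n).length := by omega
      have hzip : (reformat_graph_nodes_alt e n)[k]? =
          some ((pvGroupByNode e n (fun e_ => e_.2.2))[k]'hki,
                (pvGroupByNode e n (fun e_ => e_.1))[k]'hko) := by
        rw [List.getElem?_eq_getElem hkz]
        simp only [reformat_graph_nodes_alt]
        rw [List.getElem_zip]
      have hIn := pvGroup_get e n _ hselIn hn k hk
      have hOut := pvGroup_get e n _ hselOut hn k hk
      have hIn' : (pvGroupByNode e n (fun e_ => e_.2.2))[k]'hki =
          ((PySem.List.enumerate e 0).filter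
            (fun p => pvRes n.toNat p.2.2.2 == k)).map (fun p => p.1) := by
        have := (List.getElem?_eq_getElem hki).symm.trans hIn
        exact Option.some.inj this
      have hOut' : (pvGroupByNode e n (fun e_ => e_.1))[k]'hko =
          ((PySem.List.enumerate e 0).filter
            (fun p => pvRes n.toNat p.2.1 == k)).map (fun p => p.1) := by
        have := (List.getElem?_eq_getElem hko).symm.trans hOut
        exact Option.some.inj this
      rw [pvA_get e n hpre hn k hk, hzip, hIn', hOut']
    · rw [List.getElem?_eq_none (by omega : (reformat_graph_nodes e n).length ≤ k),
          List.getElem?_eq_none (by omega : (reformat_graph_nodes_alt e n).length ≤ k)]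
  · have he : e = [] := by
      cases e with
      | nil => rfl
      | cons p t =>
        obtain ⟨h1, h2, _, _⟩ := hpre p (List.mem_cons_self ..)
        omega
    subst he
    have h0 : n.toNat = 0 := by omega
    simp [reformat_graph_nodes, reformat_graph_nodes_alt, pvGroupByNode,
      PySem.List.enumerate_nil, h0]

-- ===== VERDICT (by name: the statement is the Claim_ definition above) =====
theorem reformat_graph_nodes_spec : Claim_equal_reformat_graph_nodes := by
  intro e n _ hpre
  unfold Spec_reformat_graph_nodes
  exact pvAeqB e n hpre
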